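-- pv_equiv track=rewrite | github.com/fouuuadi/PyVote | condorcet.py | condorcet_winner
-- ===== SOURCE A (Python) =====
-- from collections import defaultdict
--
-- def condorcet_winner(votes):
--     """
--     Trouve le gagnant de Condorcet, s'il existe.
--
--     :param votes: Liste des préférences des électeurs. Chaque préférence est une liste de candidats classés par ordre.
--     :return: Le gagnant de Condorcet ou None s'il n'y en a pas.
--     """
--     # Obtenir la liste des candidats
--     candidates = set(candidate for ballot in votes for candidate in ballot)
--     pairwise_wins = defaultdict(int)  # Comptage des victoires en confrontation directe
--     pairwise_losses = defaultdict(int)  # Comptage des défaites en confrontation directe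
--
--     # Comparer chaque paire de candidats
--     for candidate1 in candidates:
--         for candidate2 in candidates:
--             if candidate1 != candidate2:
--                 # Comptons combien d'électeurs préfèrent candidate1 à candidate2
--                 votes_for_c1 = sum(
--                     ballot.index(candidate1) < ballot.index(candidate2)
--                     for ballot in votes
--                 )
--                 votes_for_c2 = len(votes) - votes_for_c1
--                 if votes_for_c1 > votes_for_c2:
--                     pairwise_wins[candidate1] += 1
--                     pairwise_losses[candidate2] += 1
--
--     # Chercher le candidat qui gagne contre tous les autres
--     for candidate in candidates:
--         if pairwise_wins[candidate] == len(candidates) - 1: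
--             return candidate
--
--     return None  # Aucun gagnant de Condorcet trouvé
-- ===== SOURCE B (Python) =====
-- def condorcet_winner(votes):
--     # Global candidate list (first-occurrence order).
--     candidates = []
--     for ballot in votes:
--         for c in ballot:
--             if c not in candidates:
--                 candidates.append(c)
--     n = len(votes)
--     # One pass over the ballots: build the full pairwise-preference table.
--     prefers = {}
--     for ballot in votes:
--         rank = {}
--         for i, c in enumerate(ballot):
--             if c not in rank:
--                 rank[c] = i
--         for a in candidates:
--             for b in candidates:
--                 if a != b and rank[a] < rank[b]:
--                     prefers[(a, b)] = prefers.get((a, b), 0) + 1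
--     # Decision pass: a Condorcet winner beats every opponent by strict majority.
--     for c in candidates:
--         if all(d == c or 2 * prefers.get((c, d), 0) > n for d in candidates):
--             return c
--     return None
-- ===== Notes on version B (the rewrite author's own statement) =====
-- stated objective: alternative
-- what changed: B replaces A's candidates-outer nested pair loops with per-ballot scans and win/loss tally dicts by a single pass over the ballots that builds a rank map and a full pairwise-preference matrix prefers[(a,b)], followed by a separate decision pass that returns the first candidate beating every opponent by strict majority.
import Mathlib
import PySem

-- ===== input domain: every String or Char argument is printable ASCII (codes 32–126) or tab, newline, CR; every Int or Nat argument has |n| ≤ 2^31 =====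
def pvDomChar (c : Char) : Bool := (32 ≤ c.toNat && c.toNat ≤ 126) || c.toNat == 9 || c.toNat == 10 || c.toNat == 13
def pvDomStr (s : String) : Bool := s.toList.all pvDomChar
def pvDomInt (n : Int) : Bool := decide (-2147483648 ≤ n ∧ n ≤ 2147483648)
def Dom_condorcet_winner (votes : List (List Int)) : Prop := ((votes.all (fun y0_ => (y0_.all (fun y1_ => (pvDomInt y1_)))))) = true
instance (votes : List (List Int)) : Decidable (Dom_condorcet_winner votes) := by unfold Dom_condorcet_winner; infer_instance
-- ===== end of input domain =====

-- B builds the pairwise-preference matrix in one pass over the ballots (per-ballot rank map)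
-- and decides with a separate majority pass, instead of A's candidates-outer pair loops with
-- per-pair ballot scans and win/loss tallies; return values proved equal on Pre_.

-- ===== PORT A =====
-- sum(ballot.index(c1) < ballot.index(c2) for ballot in votes); `.index` raises ValueError
-- when the candidate is absent (PySem.List.index? = none); such inputs are excluded by Pre_,
-- so the `.getD 0` default is never reached inside Pre_.
def pvPrefA (votes : List (List Int)) (c1 c2 : Int) : Int :=
  (votes.map (fun ballot =>
    if (PySem.List.index? ballot c1).getD 0 < (PySem.List.index? ballot c2).getD 0
    then (1 : Int) else 0)).sum

-- body of the inner `for candidate2 in candidates` loop; state = (pairwise_wins, pairwise_losses)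
def pvStepA (votes : List (List Int)) (c1 : Int)
    (st : PySem.Dict Int Int × PySem.Dict Int Int) (c2 : Int) :
    PySem.Dict Int Int × PySem.Dict Int Int :=
  if c1 ≠ c2 then
    let votes_for_c1 := pvPrefA votes c1 c2
    let votes_for_c2 := (votes.length : Int) - votes_for_c1
    if votes_for_c1 > votes_for_c2 then
      (st.1.modify c1 0 (· + 1), st.2.modify c2 0 (· + 1))
    else st
  else st

def condorcet_winner (votes : List (List Int)) : Option Int :=
  let candidates : PySem.Set Int := PySem.Set.ofList votes.flatten
  let st := candidates.foldl (fun st c1 => candidates.foldl (pvStepA votes c1) st)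
    (PySem.Dict.empty, PySem.Dict.empty)
  -- defaultdict lookup pairwise_wins[candidate] yields 0 for a missing key: getD _ 0
  candidates.find? (fun c => st.1.getD c 0 == (candidates.length : Int) - 1)

-- ===== PORT B =====
-- rank = first-occurrence position of each candidate on the ballot
def pvRank (ballot : List Int) : PySem.Dict Int Int :=
  (PySem.List.enumerate ballot).foldl
    (fun r p => if r.contains p.2 then r else r.insert p.2 p.1) PySem.Dict.empty

-- one ballot's contribution to the preference matrix; rank[a] raises KeyError for an absent
-- candidate (excluded by Pre_), so the `.getD _ 0` default is never reached inside Pre_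
def pvStepB (cands : List Int) (prefers : PySem.Dict (Int × Int) Int) (ballot : List Int) :
    PySem.Dict (Int × Int) Int :=
  let rank := pvRank ballot
  cands.foldl (fun prefers a =>
    cands.foldl (fun prefers b =>
      if a ≠ b ∧ rank.getD a 0 < rank.getD b 0 then
        prefers.insert (a, b) (prefers.getD (a, b) 0 + 1)
      else prefers) prefers) prefers

def condorcet_winner_alt (votes : List (List Int)) : Option Int :=
  let candidates : List Int :=
    votes.foldl (fun acc ballot =>
      ballot.foldl (fun acc c => if c ∈ acc then acc else acc ++ [c]) acc) []
  let n : Int := (votes.length : Int)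
  let prefers := votes.foldl (pvStepB candidates) PySem.Dict.empty
  candidates.find? (fun c =>
    candidates.all (fun d => d == c || decide (2 * prefers.getD (c, d) 0 > n)))

-- ===== PRECONDITION & SPEC =====
-- Pre_ excludes exactly the inputs where the Python A raises ValueError: two or more distinct
-- candidates while some ballot is missing one of them.
def Pre_condorcet_winner (votes : List (List Int)) : Prop :=
  (PySem.Set.ofList votes.flatten).length ≤ 1 ∨
    ∀ b ∈ votes, ∀ c ∈ votes.flatten, c ∈ b
instance (votes : List (List Int)) : Decidable (Pre_condorcet_winner votes) := by
  unfold Pre_condorcet_winner; infer_instance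

def pvWitness_condorcet_winner : List (List Int) := [[1, 2, 3], [2, 3, 1], [2, 1, 3]]

def Spec_condorcet_winner (votes : List (List Int)) (out : Option Int) : Prop := out = condorcet_winner_alt votes
instance (votes : List (List Int)) (out : Option Int) : Decidable (Spec_condorcet_winner votes out) := by unfold Spec_condorcet_winner; infer_instance

-- ===== CLAIM (what is proved, stated in full; the proofs are below) =====
def Claim_equal_condorcet_winner : Prop := ∀ (votes : List (List Int)), Dom_condorcet_winner votes → Pre_condorcet_winner votes → Spec_condorcet_winner votes (condorcet_winner votes)

-- ===== LEMMAS AND PROOFS =====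

-- the shared mathematical content: on how many ballots does c precede d (first occurrences)
def pvPref (votes : List (List Int)) (c d : Int) : Nat :=
  votes.countP (fun b => decide ((PySem.List.index? b c).getD 0 < (PySem.List.index? b d).getD 0))

def pvBeats (votes : List (List Int)) (c d : Int) : Bool :=
  decide (pvPrefA votes c d > (votes.length : Int) - pvPrefA votes c d)

theorem pvPrefA_eq (votes : List (List Int)) (c d : Int) :
    pvPrefA votes c d = (pvPref votes c d : Int) := by
  unfold pvPrefA pvPref
  induction votes with
  | nil => rfl
  | cons b t ih =>
    simp only [List.map_cons, List.sum_cons, List.countP_cons, ih]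
    by_cases h : (PySem.List.index? b c).getD 0 < (PySem.List.index? b d).getD 0
    · rw [if_pos h, if_pos (by simpa using h)]
      push_cast; ring
    · rw [if_neg h, if_neg (by simpa using h)]
      push_cast; ring

-- B's candidate-collection loop is set(flatten) in first-occurrence order
theorem pvCandsB_eq (votes : List (List Int)) :
    votes.foldl (fun acc ballot =>
      ballot.foldl (fun acc c => if c ∈ acc then acc else acc ++ [c]) acc) [] =
    PySem.Set.ofList votes.flatten := by
  rw [PySem.Set.ofList_eq_foldl, ← List.foldl_flatten]
  congr 1
  funext acc c
  rw [PySem.Set.add_eq_ite]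

-- the rank dict holds the first-occurrence indices, shifted by the start offset
theorem pvRank_get?_aux (b : List Int) (s : Int) (r : PySem.Dict Int Int) (c : Int) :
    ((PySem.List.enumerate b s).foldl
      (fun r p => if r.contains p.2 then r else r.insert p.2 p.1) r).get? c =
    if r.contains c then r.get? c
    else (PySem.List.index? b c).map (fun k => s + (k : Int)) := by
  induction b generalizing s r with
  | nil =>
    rw [PySem.List.enumerate_nil]
    simp only [List.foldl_nil]
    by_cases hc : r.contains c = true
    · rw [if_pos hc]
    · rw [if_neg hc, (PySem.Dict.get?_eq_none_iff_contains r c).mpr (by simpa using hc)]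
      simp [PySem.List.index?]
  | cons x t ih =>
    rw [PySem.List.enumerate_cons]
    simp only [List.foldl_cons]
    by_cases hxc : x = c
    · subst hxc
      rw [PySem.List.index?_cons_self]
      by_cases hx : r.contains x = true
      · rw [if_pos hx, ih, if_pos hx, if_pos hx]
      · rw [if_neg hx, ih, if_neg hx,
          if_pos (show (r.insert x s).contains x = true by simp),
          PySem.Dict.get?_insert_self]
        simp
    · rw [PySem.List.index?_cons_of_ne t hxc]
      have hcont : ∀ (v : Int), ((r.insert x v).contains c) = r.contains c := by
        intro v
        rw [PySem.Dict.contains_insert]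
        have : (c == x) = false := by simp [Ne.symm hxc]
        simp [this]
      by_cases hc : r.contains c = true
      · by_cases hx : r.contains x = true
        · rw [if_pos hx, ih, if_pos hc, if_pos hc]
        · rw [if_neg hx, ih, hcont, if_pos hc, if_pos hc,
            PySem.Dict.get?_insert_of_ne r s (Ne.symm hxc)]
      · by_cases hx : r.contains x = true
        · rw [if_pos hx, ih, if_neg hc, if_neg hc]
          cases PySem.List.index? t c with
          | none => rfl
          | some k => simp; ring
        · rw [if_neg hx, ih, hcont, if_neg hc, if_neg hc]
          cases PySem.List.index? t c with
          | none => rfl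
          | some k => simp; ring

theorem pvRank_getD (b : List Int) (c : Int) :
    (pvRank b).getD c 0 = (((PySem.List.index? b c).getD 0 : Nat) : Int) := by
  unfold pvRank
  rw [PySem.Dict.getD_eq_get?_getD, pvRank_get?_aux]
  rw [if_neg (by simp [PySem.Dict.contains_empty])]
  cases PySem.List.index? b c <;> simp

-- A-side: what pairwise_wins holds after the double candidate loop
theorem pvWinsA_inner (votes : List (List Int)) (c1 : Int) (l : List Int)
    (st : PySem.Dict Int Int × PySem.Dict Int Int) (c : Int) :
    (l.foldl (pvStepA votes c1) st).1.getD c 0 =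
      st.1.getD c 0 + (if c = c1 then
        (l.countP (fun c2 => decide (c1 ≠ c2) && pvBeats votes c1 c2) : Int) else 0) := by
  induction l generalizing st with
  | nil => simp
  | cons c2 t ih =>
    simp only [List.foldl_cons, List.countP_cons, ih]
    unfold pvStepA
    by_cases h12 : c1 ≠ c2
    · rw [if_pos h12]
      by_cases hb : pvPrefA votes c1 c2 > (votes.length : Int) - pvPrefA votes c1 c2
      · simp only [if_pos hb]
        have hbt : (decide (c1 ≠ c2) && pvBeats votes c1 c2) = true := by
          simp [pvBeats, h12, hb]
        rw [hbt]
        simp only [PySem.Dict.getD_modify]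
        by_cases hc : c = c1
        · subst hc
          rw [if_pos rfl, if_pos rfl, if_pos rfl]
          push_cast; ring
        · rw [if_neg hc, if_neg hc, if_neg hc]
      · simp only [if_neg hb]
        have hbt : (decide (c1 ≠ c2) && pvBeats votes c1 c2) = false := by
          simp [pvBeats, hb]
        rw [hbt]
        simp
    · rw [if_neg h12]
      have hbt : (decide (c1 ≠ c2) && pvBeats votes c1 c2) = false := by
        simp [h12]
      rw [hbt]
      simp

theorem pvWinsA_outer (votes : List (List Int)) (l m : List Int)
    (st : PySem.Dict Int Int × PySem.Dict Int Int) (c : Int) :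
    (l.foldl (fun st c1 => m.foldl (pvStepA votes c1) st) st).1.getD c 0 =
      st.1.getD c 0 + (l.count c : Int) *
        (m.countP (fun d => decide (c ≠ d) && pvBeats votes c d) : Int) := by
  induction l generalizing st with
  | nil => simp
  | cons c1 t ih =>
    simp only [List.foldl_cons, ih, pvWinsA_inner, List.count_cons]
    by_cases hc : c = c1
    · subst hc
      simp only [beq_self_eq_true, if_pos]
      push_cast; ring
    · rw [if_neg hc]
      have : (c1 == c) = false := by simp [Ne.symm hc]
      rw [this]
      push_cast; ring

-- B-side: one pair's cell after one ballot's inner loop, then after both candidate loops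
theorem pvStepB_inner (rank : PySem.Dict Int Int) (a : Int) (l : List Int)
    (p : PySem.Dict (Int × Int) Int) (c d : Int) :
    (l.foldl (fun p b =>
        if a ≠ b ∧ rank.getD a 0 < rank.getD b 0 then
          p.insert (a, b) (p.getD (a, b) 0 + 1) else p) p).getD (c, d) 0 =
      p.getD (c, d) 0 + (if a = c ∧ c ≠ d ∧ rank.getD c 0 < rank.getD d 0 then
        (l.count d : Int) else 0) := by
  induction l generalizing p with
  | nil => simp
  | cons b t ih =>
    simp only [List.foldl_cons, ih, List.count_cons]
    by_cases hcond : a ≠ b ∧ rank.getD a 0 < rank.getD b 0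
    · rw [if_pos hcond]
      rw [PySem.Dict.getD_insert]
      by_cases hk : (c, d) = (a, b)
      · have hca : a = c := by cases hk; rfl
        have hdb : b = d := by cases hk; rfl
        subst hca hdb
        rw [if_pos rfl, if_pos ⟨rfl, hcond⟩, if_pos ⟨rfl, hcond⟩]
        simp
        ring
      · rw [if_neg hk]
        by_cases hmain : a = c ∧ c ≠ d ∧ rank.getD c 0 < rank.getD d 0
        · rw [if_pos hmain, if_pos hmain]
          have hbd : (b == d) = false := by
            simp only [beq_eq_false_iff_ne]
            intro hbd
            exact hk (by rw [hmain.1, hbd])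
          rw [hbd]
          simp
        · rw [if_neg hmain, if_neg hmain]
    · rw [if_neg hcond]
      by_cases hmain : a = c ∧ c ≠ d ∧ rank.getD c 0 < rank.getD d 0
      · rw [if_pos hmain, if_pos hmain]
        have hbd : (b == d) = false := by
          simp only [beq_eq_false_iff_ne]
          intro hbd
          exact hcond (by rw [hmain.1, hbd]; exact ⟨hmain.2.1, hmain.2.2⟩)
        rw [hbd]
        simp
      · rw [if_neg hmain, if_neg hmain]

theorem pvStepB_outer (rank : PySem.Dict Int Int) (l m : List Int)
    (p : PySem.Dict (Int × Int) Int) (c d : Int) :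
    (l.foldl (fun p a => m.foldl (fun p b =>
        if a ≠ b ∧ rank.getD a 0 < rank.getD b 0 then
          p.insert (a, b) (p.getD (a, b) 0 + 1) else p) p) p).getD (c, d) 0 =
      p.getD (c, d) 0 + (if c ≠ d ∧ rank.getD c 0 < rank.getD d 0 then
        (l.count c : Int) * (m.count d : Int) else 0) := by
  induction l generalizing p with
  | nil => simp
  | cons a t ih =>
    simp only [List.foldl_cons, ih, pvStepB_inner, List.count_cons]
    by_cases hmain : c ≠ d ∧ rank.getD c 0 < rank.getD d 0
    · rw [if_pos hmain, if_pos hmain]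
      by_cases hac : a = c
      · rw [if_pos ⟨hac, hmain⟩]
        rw [show (a == c) = true by simp [hac]]
        simp only [if_true]
        push_cast; ring
      · rw [if_neg (fun h => hac h.1)]
        rw [show (a == c) = false by simp [hac]]
        simp only [Bool.false_eq_true, if_false]
        push_cast; ring
    · rw [if_neg hmain, if_neg hmain, if_neg (fun h => hmain h.2)]
      simp

theorem pvPrefersB (votes : List (List Int)) (cands : List Int) (c d : Int)
    (hc : cands.count c = 1) (hd : cands.count d = 1) (hne : c ≠ d)
    (p : PySem.Dict (Int × Int) Int) :
    (votes.foldl (pvStepB cands) p).getD (c, d) 0 =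
      p.getD (c, d) 0 + (pvPref votes c d : Int) := by
  induction votes generalizing p with
  | nil => simp [pvPref]
  | cons b t ih =>
    simp only [List.foldl_cons, ih]
    unfold pvStepB
    rw [pvStepB_outer, hc, hd]
    have hcond : ((pvRank b).getD c 0 < (pvRank b).getD d 0) ↔
        ((PySem.List.index? b c).getD 0 < (PySem.List.index? b d).getD 0) := by
      rw [pvRank_getD, pvRank_getD]
      exact_mod_cast Nat.cast_lt (α := Int)
    have hpref : pvPref (b :: t) c d =
        (if (PySem.List.index? b c).getD 0 < (PySem.List.index? b d).getD 0 then 1 else 0) +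
          pvPref t c d := by
      unfold pvPref
      rw [List.countP_cons]
      by_cases h : (PySem.List.index? b c).getD 0 < (PySem.List.index? b d).getD 0
      · rw [if_pos h, if_pos (by simpa using h)]
        omega
      · rw [if_neg h, if_neg (by simpa using h)]
        omega
    rw [hpref]
    by_cases h : (PySem.List.index? b c).getD 0 < (PySem.List.index? b d).getD 0
    · rw [if_pos ⟨hne, hcond.mpr h⟩, if_pos h]
      push_cast; ring
    · rw [if_neg (fun hx => h (hcond.mp hx.2)), if_neg h]
      push_cast; ring

-- counting: the tally reaches |cands| - 1 exactly when every opponent is beaten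
theorem pvCount_all (cands : List Int) (hnd : cands.Nodup) (c : Int) (hc : c ∈ cands)
    (P : Int → Bool) :
    ((cands.countP (fun d => decide (c ≠ d) && P d) : Int) = (cands.length : Int) - 1 ↔
      ∀ d ∈ cands, d ≠ c → P d = true) := by
  have hperm : cands.Perm (c :: cands.erase c) := List.perm_cons_erase hc
  have hcount : cands.countP (fun d => decide (c ≠ d) && P d) =
      (cands.erase c).countP (fun d => decide (c ≠ d) && P d) := by
    rw [hperm.countP_eq]
    simp
  have hlen : cands.length = (cands.erase c).length + 1 := by
    rw [hperm.length_eq]; rfl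
  have hmem : ∀ d, d ∈ cands.erase c ↔ d ≠ c ∧ d ∈ cands := by
    intro d
    exact List.Nodup.mem_erase_iff hnd
  have hle : (cands.erase c).countP (fun d => decide (c ≠ d) && P d) ≤ (cands.erase c).length :=
    List.countP_le_length
  constructor
  · intro h d hd hdc
    have heq : (cands.erase c).countP (fun d => decide (c ≠ d) && P d) = (cands.erase c).length := by
      omega
    have := List.countP_eq_length.mp heq d ((hmem d).mpr ⟨hdc, hd⟩)
    simp only [Bool.and_eq_true, decide_eq_true_eq] at this
    exact this.2
  · intro h
    have heq : (cands.erase c).countP (fun d => decide (c ≠ d) && P d) = (cands.erase c).length := by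
      apply List.countP_eq_length.mpr
      intro d hd
      have hm := (hmem d).mp hd
      simp [Ne.symm hm.1, h d hm.2 hm.1]
    omega

theorem pvFind?_congr {α : Type} (l : List α) (p q : α → Bool)
    (h : ∀ x ∈ l, p x = q x) : l.find? p = l.find? q := by
  induction l with
  | nil => rfl
  | cons x t ih =>
    simp only [List.find?]
    rw [h x (by simp)]
    cases q x
    · exact ih (fun y hy => h y (by simp [hy]))
    · rfl

-- ===== VERDICT (by name: the statement is the Claim_ definition above) =====
theorem condorcet_winner_spec : Claim_equal_condorcet_winner := by
  intro votes _ _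
  unfold Spec_condorcet_winner
  simp only [condorcet_winner, condorcet_winner_alt]
  rw [pvCandsB_eq]
  apply pvFind?_congr
  intro c hcmem
  have hnd : (PySem.Set.ofList votes.flatten).Nodup := PySem.Set.nodup_ofList _
  have hc1 : (PySem.Set.ofList votes.flatten).count c = 1 :=
    List.count_eq_one_of_mem hnd hcmem
  rw [pvWinsA_outer, PySem.Dict.getD_empty, hc1]
  simp only [zero_add, Nat.cast_one, one_mul]
  have hbeats : ∀ d : Int, (pvBeats votes c d = true) ↔
      (2 * (pvPref votes c d : Int) > (votes.length : Int)) := by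
    intro d
    unfold pvBeats
    rw [decide_eq_true_eq, pvPrefA_eq]
    omega
  rw [Bool.eq_iff_iff, beq_iff_eq,
    pvCount_all (PySem.Set.ofList votes.flatten) hnd c hcmem (pvBeats votes c),
    List.all_eq_true]
  constructor
  · intro h d hd
    by_cases hdc : d = c
    · simp [hdc]
    · have hb := (hbeats d).mp (h d hd hdc)
      have hpd : (votes.foldl (pvStepB (PySem.Set.ofList votes.flatten)) PySem.Dict.empty).getD (c, d) 0 =
          (pvPref votes c d : Int) := by
        rw [pvPrefersB votes _ c d hc1 (List.count_eq_one_of_mem hnd hd) (Ne.symm hdc),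
          PySem.Dict.getD_empty, zero_add]
      simp only [Bool.or_eq_true, beq_iff_eq, decide_eq_true_eq]
      right
      rw [hpd]
      exact hb
  · intro h d hd hdc
    have := h d hd
    simp only [Bool.or_eq_true, beq_iff_eq, decide_eq_true_eq] at this
    rcases this with hdc' | hgt
    · exact absurd hdc' hdc
    · apply (hbeats d).mpr
      have hpd : (votes.foldl (pvStepB (PySem.Set.ofList votes.flatten)) PySem.Dict.empty).getD (c, d) 0 =
          (pvPref votes c d : Int) := by
        rw [pvPrefersB votes _ c d hc1 (List.count_eq_one_of_mem hnd hd) (Ne.symm hdc),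
          PySem.Dict.getD_empty, zero_add]
      rwa [hpd] at hgt
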